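-- pv_equiv track=rewrite | github.com/cdhcsh/jungle-week03-algorithm | python/dp/2629.py | solve
-- ===== SOURCE A (Python) =====
-- def solve(data: list, targets: list) -> list:
--     dp = set()
--     dp.add(0)
--     result = []
--     for weight in data:
--         for no in list(dp):
--             dp.add(no + weight)
--             dp.add(abs(no - weight))
--
--     for marble in targets:
--         if marble in dp:
--             result.append('Y')
--         else:
--             result.append('N')
--     return result
-- ===== SOURCE B (Python) =====
-- def solve(data: list, targets: list) -> list:
--     # Backward memoized recursion: reach(i, d) asks whether difference d can be
--     # driven to 0 using the weights data[:i], by inverting the forward moves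
--     # no -> no + w (inverse: d - w) and no -> abs(no - w) (inverses: d + w and
--     # w - d, both only meaningful when d >= 0).
--     memo = {}
--
--     def reach(i, d):
--         if i == 0:
--             return d == 0
--         key = (i, d)
--         if key in memo:
--             return memo[key]
--         w = data[i - 1]
--         res = reach(i - 1, d) or reach(i - 1, d - w) or \
--             (d >= 0 and (reach(i - 1, d + w) or reach(i - 1, w - d)))
--         memo[key] = res
--         return res
--
--     return ['Y' if reach(len(data), t) else 'N' for t in targets]
-- ===== Notes on version B (the rewrite author's own statement) =====
-- stated objective: faster
-- what changed: Replaces the forward set-building DP (grow the full reachable set by iterating every weight over a snapshot of the set) with a memoized backward recursion reach(i, d) over the weight-list prefix that inverts the transitions (d-w; and for d>=0 also d+w and w-d), so only states reachable backward from the queried targets are ever explored.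
import Mathlib
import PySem

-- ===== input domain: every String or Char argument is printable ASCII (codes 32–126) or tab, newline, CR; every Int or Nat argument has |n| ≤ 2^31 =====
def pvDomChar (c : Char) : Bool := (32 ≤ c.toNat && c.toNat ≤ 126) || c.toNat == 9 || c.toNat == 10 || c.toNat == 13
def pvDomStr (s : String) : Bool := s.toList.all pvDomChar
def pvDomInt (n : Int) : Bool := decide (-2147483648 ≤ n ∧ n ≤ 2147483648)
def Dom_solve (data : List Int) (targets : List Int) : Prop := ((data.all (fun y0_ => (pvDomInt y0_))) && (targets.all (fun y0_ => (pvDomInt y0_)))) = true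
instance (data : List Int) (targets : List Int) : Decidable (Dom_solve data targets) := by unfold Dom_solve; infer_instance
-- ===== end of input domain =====

-- B replaces A's forward reachable-set construction by a memoized backward recursion
-- over the weight list that inverts the transitions, exploring only states backward-reachable
-- from the targets; a timing run measured B faster (objective: faster).

-- ===== PORT A =====
-- 'for no in list(dp)' folds over the snapshot of dp (a PySem.Set, whose iteration
-- order only feeds further Set.adds and membership tests, so order cannot matter).
def solve (data : List Int) (targets : List Int) : List String :=
  let dp : PySem.Set Int :=
    data.foldl
      (fun dp weight =>
        dp.foldl (fun d no => PySem.Set.add (PySem.Set.add d (no + weight)) |no - weight|) dp)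
      (PySem.Set.add PySem.Set.empty 0)
  targets.foldl
    (fun result marble =>
      if PySem.Set.contains dp marble then result ++ ["Y"] else result ++ ["N"]) []

-- ===== PORT B =====
-- Source B's reach(i, d) recurses on i with w = data[i-1], i.e. it peels the LAST weight
-- of the prefix data[:i]; here that is structural recursion on the reversed prefix.
-- The Python memo cache only shares recomputation and does not change values, so the
-- port is the same recursion without the cache.
def reachRev (rev : List Int) (d : Int) : Bool :=
  match rev with
  | [] => d == 0
  | w :: rest =>
      reachRev rest d || reachRev rest (d - w) ||
        (decide (0 ≤ d) && (reachRev rest (d + w) || reachRev rest (w - d)))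

def solve_alt (data : List Int) (targets : List Int) : List String :=
  targets.map (fun t => if reachRev data.reverse t then "Y" else "N")

-- ===== PRECONDITION & SPEC =====
def Spec_solve (data : List Int) (targets : List Int) (out : List String) : Prop := out = solve_alt data targets
instance (data : List Int) (targets : List Int) (out : List String) : Decidable (Spec_solve data targets out) := by unfold Spec_solve; infer_instance

-- ===== CLAIM (what is proved, stated in full; the proofs are below) =====
def Claim_equal_solve : Prop := ∀ (data : List Int) (targets : List Int), Dom_solve data targets → Spec_solve data targets (solve data targets)

-- ===== LEMMAS AND PROOFS =====

-- Membership after one pass of A's inner loop (snapshot list L, accumulator set s).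
theorem mem_innerPass (L : List Int) (s : PySem.Set Int) (w x : Int) :
    x ∈ L.foldl (fun d no => PySem.Set.add (PySem.Set.add d (no + w)) |no - w|) s ↔
      x ∈ s ∨ ∃ no ∈ L, x = no + w ∨ x = |no - w| := by
  induction L generalizing s with
  | nil => simp
  | cons a L ih =>
      simp only [List.foldl_cons, ih, PySem.Set.mem_add, List.mem_cons]
      constructor
      · rintro (((h | h) | h) | ⟨no, hno, h⟩)
        · exact Or.inl h
        · exact Or.inr ⟨a, Or.inl rfl, Or.inl h⟩
        · exact Or.inr ⟨a, Or.inl rfl, Or.inr h⟩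
        · exact Or.inr ⟨no, Or.inr hno, h⟩
      · rintro (h | ⟨no, (rfl | hno), h⟩)
        · exact Or.inl (Or.inl (Or.inl h))
        · rcases h with h | h
          · exact Or.inl (Or.inl (Or.inr h))
          · exact Or.inl (Or.inr h)
        · exact Or.inr ⟨no, hno, h⟩

-- Inverting the forward step: x arises from some no ∈ s iff one of the inverse
-- positions x - w, x + w, w - x (the latter two only when 0 ≤ x) lies in s.
theorem step_inverse (s : List Int) (w x : Int) :
    (∃ no ∈ s, x = no + w ∨ x = |no - w|) ↔
      ((x - w) ∈ s ∨ (0 ≤ x ∧ ((x + w) ∈ s ∨ (w - x) ∈ s))) := by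
  constructor
  · rintro ⟨no, hno, h | h⟩
    · exact Or.inl (by simpa [show x - w = no by omega] using hno)
    · rcases abs_cases (no - w) with ⟨he, hnn⟩ | ⟨he, hneg⟩
      · exact Or.inr ⟨by omega, Or.inl (by simpa [show x + w = no by omega] using hno)⟩
      · exact Or.inr ⟨by omega, Or.inr (by simpa [show w - x = no by omega] using hno)⟩
  · rintro (h | ⟨hx, h | h⟩)
    · exact ⟨x - w, h, Or.inl (by omega)⟩
    · exact ⟨x + w, h, Or.inr (by rw [abs_of_nonneg (by omega : (0:Int) ≤ x + w - w)]; omega)⟩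
    · refine ⟨w - x, h, Or.inr ?_⟩
      rw [show w - x - w = -x by omega, abs_neg, abs_of_nonneg hx]

-- The heart: membership in A's final set equals B's backward recursion.
theorem mem_fold_iff_reachRev (data : List Int) (x : Int) :
    x ∈ data.foldl
        (fun dp weight =>
          dp.foldl (fun d no => PySem.Set.add (PySem.Set.add d (no + weight)) |no - weight|) dp)
        (PySem.Set.add PySem.Set.empty 0) ↔ reachRev data.reverse x = true := by
  induction data using List.reverseRecOn generalizing x with
  | nil =>
      simp [reachRev, PySem.Set.mem_add, PySem.Set.empty]
  | append_singleton l w ih =>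
      rw [List.foldl_append, List.reverse_append]
      simp only [List.foldl_cons, List.foldl_nil, List.reverse_singleton,
        List.singleton_append, reachRev]
      rw [mem_innerPass, step_inverse]
      simp only [Bool.or_eq_true, Bool.and_eq_true, decide_eq_true_eq, ih]
      tauto

-- A's answer loop with accumulator = a map.
theorem foldl_yn (c : Int → Bool) (ts : List Int) (acc : List String) :
    ts.foldl (fun result marble => if c marble then result ++ ["Y"] else result ++ ["N"]) acc =
      acc ++ ts.map (fun marble => if c marble then "Y" else "N") := by
  induction ts generalizing acc with
  | nil => simp
  | cons t ts ih =>
      simp only [List.foldl_cons, List.map_cons, ih]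
      by_cases h : c t <;> simp [h]

-- ===== VERDICT (by name: the statement is the Claim_ definition above) =====
theorem solve_spec : Claim_equal_solve := by
  intro data targets _
  show solve data targets = solve_alt data targets
  unfold solve solve_alt
  rw [foldl_yn]
  simp only [List.nil_append]
  apply List.map_congr_left
  intro t _
  have h : PySem.Set.contains
      (data.foldl
        (fun dp weight =>
          dp.foldl (fun d no => PySem.Set.add (PySem.Set.add d (no + weight)) |no - weight|) dp)
        (PySem.Set.add PySem.Set.empty 0)) t = reachRev data.reverse t := by
    rw [Bool.eq_iff_iff, PySem.Set.contains_iff, mem_fold_iff_reachRev]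
  rw [h]
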